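-- pv_equiv track=rewrite | github.com/TheFirstFen/lnu | emil/year_1/1dt901_python/eu222dq_aassignment 2/simple_strings.py | char_symbol_number
-- ===== SOURCE A (Python) =====
-- def char_symbol_number(s):
--     char = 0
--     sym = 0
--     num = 0
--     for c in s.lower():
--         if 97 <= ord(c) < 123:
--             char += 1
--         elif 48 <= ord(c) < 58:
--             num += 1
--         else:
--             sym += 1
--     return char, num, sym
-- ===== SOURCE B (Python) =====
-- def char_symbol_number(s):
--     freq = {}
--     for c in s.lower():
--         freq[c] = freq.get(c, 0) + 1
--     char = sum(v for c, v in freq.items() if 'a' <= c <= 'z')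
--     num = sum(v for c, v in freq.items() if '0' <= c <= '9')
--     return char, num, len(s) - char - num
-- ===== Notes on version B (the rewrite author's own statement) =====
-- stated objective: alternative
-- what changed: Builds a character-frequency dictionary in one pass, then aggregates letter and digit totals from the table's entries and derives the symbol count as len(s) - char - num, instead of classifying every character with a three-way branch.
import Mathlib
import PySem

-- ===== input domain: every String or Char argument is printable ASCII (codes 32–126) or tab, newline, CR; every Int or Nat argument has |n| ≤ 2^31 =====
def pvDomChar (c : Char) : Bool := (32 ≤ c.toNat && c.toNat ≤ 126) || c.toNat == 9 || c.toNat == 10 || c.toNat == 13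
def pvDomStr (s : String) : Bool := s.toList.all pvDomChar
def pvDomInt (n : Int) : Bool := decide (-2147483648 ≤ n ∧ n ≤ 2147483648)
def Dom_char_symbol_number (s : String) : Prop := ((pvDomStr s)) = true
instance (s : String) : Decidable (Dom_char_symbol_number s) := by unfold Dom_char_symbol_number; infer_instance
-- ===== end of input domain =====

-- B builds a character-frequency dictionary in one pass, then aggregates letter and
-- digit totals from the table and derives sym = len(s) - char - num (objective: alternative).

-- ===== PORT A =====
-- one pass over s.lower(), three counters updated by an if/elif/else chain
def char_symbol_number (s : String) : Int × Int × Int :=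
  let r := ((PySem.Str.lower s).toList).foldl
    (fun (st : Int × Int × Int) c =>
      let (char, sym, num) := st
      if 97 ≤ c.toNat ∧ c.toNat < 123 then (char + 1, sym, num)
      else if 48 ≤ c.toNat ∧ c.toNat < 58 then (char, sym, num + 1)
      else (char, sym + 1, num))
    (0, 0, 0)
  (r.1, r.2.2, r.2.1)

-- ===== PORT B =====
-- frequency dict built with freq[c] = freq.get(c, 0) + 1, then category sums over its items
def char_symbol_number_alt (s : String) : Int × Int × Int :=
  let t := (PySem.Str.lower s).toList
  let freq := t.foldl (fun (d : PySem.Dict Char Int) c => d.insert c (d.getD c 0 + 1)) PySem.Dict.empty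
  let char : Int := ((freq.items.filter (fun p => decide ('a' ≤ p.1 ∧ p.1 ≤ 'z'))).map (·.2)).sum
  let num : Int := ((freq.items.filter (fun p => decide ('0' ≤ p.1 ∧ p.1 ≤ '9'))).map (·.2)).sum
  (char, num, PySem.Str.len s - char - num)

-- ===== PRECONDITION & SPEC =====
def Spec_char_symbol_number (s : String) (out : Int × Int × Int) : Prop := out = char_symbol_number_alt s
instance (s : String) (out : Int × Int × Int) : Decidable (Spec_char_symbol_number s out) := by unfold Spec_char_symbol_number; infer_instance

-- ===== CLAIM (what is proved, stated in full; the proofs are below) =====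
def Claim_equal_char_symbol_number : Prop := ∀ (s : String), Dom_char_symbol_number s → Spec_char_symbol_number s (char_symbol_number s)

-- ===== LEMMAS AND PROOFS =====

def pvLetterP (c : Char) : Bool := decide (97 ≤ c.toNat ∧ c.toNat < 123)
def pvDigitP (c : Char) : Bool := decide (48 ≤ c.toNat ∧ c.toNat < 58)

theorem pvLetterP_eq : (fun c : Char => decide ('a' ≤ c ∧ c ≤ 'z')) = pvLetterP := by
  funext c
  simp only [pvLetterP, Char.le_def, decide_eq_decide]
  constructor
  · rintro ⟨h1, h2⟩
    exact ⟨UInt32.le_iff_toNat_le.mp h1, Nat.lt_succ_of_le (UInt32.le_iff_toNat_le.mp h2)⟩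
  · rintro ⟨h1, h2⟩
    exact ⟨UInt32.le_iff_toNat_le.mpr h1, UInt32.le_iff_toNat_le.mpr (Nat.lt_succ_iff.mp h2)⟩

theorem pvDigitP_eq : (fun c : Char => decide ('0' ≤ c ∧ c ≤ '9')) = pvDigitP := by
  funext c
  simp only [pvDigitP, Char.le_def, decide_eq_decide]
  constructor
  · rintro ⟨h1, h2⟩
    exact ⟨UInt32.le_iff_toNat_le.mp h1, Nat.lt_succ_of_le (UInt32.le_iff_toNat_le.mp h2)⟩
  · rintro ⟨h1, h2⟩
    exact ⟨UInt32.le_iff_toNat_le.mpr h1, UInt32.le_iff_toNat_le.mpr (Nat.lt_succ_iff.mp h2)⟩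

-- A's fold computes the three category counts
theorem pv_fold_char (l : List Char) : ∀ (ch sy nu : Int),
    l.foldl (fun (st : Int × Int × Int) c =>
      let (char, sym, num) := st
      if 97 ≤ c.toNat ∧ c.toNat < 123 then (char + 1, sym, num)
      else if 48 ≤ c.toNat ∧ c.toNat < 58 then (char, sym, num + 1)
      else (char, sym + 1, num)) (ch, sy, nu)
    = (ch + (l.countP pvLetterP : Nat),
       sy + ((l.length : Int) - (l.countP pvLetterP : Nat) - (l.countP pvDigitP : Nat)),
       nu + (l.countP pvDigitP : Nat)) := by
  induction l with
  | nil => simp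
  | cons c l ih =>
    intro ch sy nu
    by_cases hL : 97 ≤ c.toNat ∧ c.toNat < 123
    · have hD : ¬ (48 ≤ c.toNat ∧ c.toNat < 58) := by omega
      simp only [List.foldl_cons, List.countP_cons, List.length_cons,
        pvLetterP, pvDigitP, hL, hD, decide_true, decide_false, if_true, if_false, ih]
      simp only [Prod.mk.injEq, and_self, decide_true, if_true]
      push_cast
      refine ⟨by ring, by ring, by ring⟩
    · by_cases hD : 48 ≤ c.toNat ∧ c.toNat < 58
      · simp only [List.foldl_cons, List.countP_cons, List.length_cons, 
          pvLetterP, pvDigitP, hL, hD, decide_true, decide_false, if_true, if_false, ih]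
        simp only [Prod.mk.injEq, and_self, decide_true, if_true]
        push_cast
        refine ⟨by ring, by ring, by ring⟩
      · simp only [List.foldl_cons, List.countP_cons, List.length_cons, 
          pvLetterP, pvDigitP, hL, hD, decide_true, decide_false, if_true, if_false, ih]
        simp only [Prod.mk.injEq, and_self, decide_true, if_true]
        push_cast
        refine ⟨by ring, by ring, by ring⟩

-- summing the counter's values over the keys satisfying p gives countP p
theorem pv_counter_sum (p : Char → Bool) (t : List Char) :
    ((((PySem.Dict.counter t).items).filter (fun q => p q.1)).map (·.2)).sum
      = ((t.countP p : Nat) : Int) := by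
  rw [PySem.Dict.items_counter]
  rw [List.filter_map, List.map_map]
  simp only [Function.comp_def]
  have hperm : List.Perm (PySem.Set.ofList t) t.dedup := by
    refine (List.perm_ext_iff_of_nodup (PySem.Set.nodup_ofList t) t.nodup_dedup).mpr ?_
    intro a
    rw [PySem.Set.mem_ofList, List.mem_dedup]
  have hperm2 := ((hperm.filter (fun k => p k)).map (fun k => ((t.count k : Nat) : Int)))
  rw [hperm2.sum_eq]
  have hcast : ∀ (K : List Char),
      (K.map (fun k => ((t.count k : Nat) : Int))).sum = ((K.map (fun k => t.count k)).sum : Nat) := by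
    intro K; induction K with
    | nil => simp
    | cons a K ih => simp [ih]
  rw [hcast]
  have : (t.dedup.filter fun k => p k) = t.dedup.filter p := by simp
  rw [this, List.sum_map_count_dedup_filter_eq_countP]

theorem pv_counter_sum_letter (t : List Char) :
    ((((PySem.Dict.counter t).items).filter (fun q => decide ('a' ≤ q.1 ∧ q.1 ≤ 'z'))).map (·.2)).sum
      = ((t.countP pvLetterP : Nat) : Int) := by
  have h : (fun q : Char × Int => decide ('a' ≤ q.1 ∧ q.1 ≤ 'z')) = (fun q => pvLetterP q.1) := by
    funext q; exact congrFun pvLetterP_eq q.1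
  rw [h]; exact pv_counter_sum pvLetterP t

theorem pv_counter_sum_digit (t : List Char) :
    ((((PySem.Dict.counter t).items).filter (fun q => decide ('0' ≤ q.1 ∧ q.1 ≤ '9'))).map (·.2)).sum
      = ((t.countP pvDigitP : Nat) : Int) := by
  have h : (fun q : Char × Int => decide ('0' ≤ q.1 ∧ q.1 ≤ '9')) = (fun q => pvDigitP q.1) := by
    funext q; exact congrFun pvDigitP_eq q.1
  rw [h]; exact pv_counter_sum pvDigitP t

-- ===== VERDICT (by name: the statement is the Claim_ definition above) =====
theorem char_symbol_number_spec : Claim_equal_char_symbol_number := by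
  intro s _
  unfold Spec_char_symbol_number char_symbol_number char_symbol_number_alt
  simp only [PySem.Dict.foldl_insert_getD_add_one_eq_counter]
  rw [pv_counter_sum_letter, pv_counter_sum_digit]
  simp only [pv_fold_char, PySem.Str.len_eq,
    PySem.Str.toList_lower, PySem.Chars.lower, List.length_map]
  refine Prod.ext (by ring) (Prod.ext (by ring) (by push_cast; ring))
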